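-- pv_equiv track=rewrite | github.com/DHRUMI644/python1 | B034/demo2.py | segregatemarks
-- ===== SOURCE A (Python) =====
-- def segregatemarks(lst):
--     a = []
--     b = []
--     c = []
--
--     for val in lst:
--         if val >= 80:
--             a.append(val)
--         elif val >= 50:
--             b.append(val)
--         else:
--             c.append(val)
--
--     return a, b, c
-- ===== SOURCE B (Python) =====
-- def segregatemarks(lst):
--     a = [x for x in lst if x >= 80]
--     b = [x for x in lst if 50 <= x < 80]
--     c = [x for x in lst if x < 50]
--     return a, b, c
-- ===== Notes on version B (the rewrite author's own statement) =====
-- stated objective: idiomatic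
-- what changed: Replaces the single accumulating loop with three independent filter comprehensions, one per grade bucket.
import Mathlib
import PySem

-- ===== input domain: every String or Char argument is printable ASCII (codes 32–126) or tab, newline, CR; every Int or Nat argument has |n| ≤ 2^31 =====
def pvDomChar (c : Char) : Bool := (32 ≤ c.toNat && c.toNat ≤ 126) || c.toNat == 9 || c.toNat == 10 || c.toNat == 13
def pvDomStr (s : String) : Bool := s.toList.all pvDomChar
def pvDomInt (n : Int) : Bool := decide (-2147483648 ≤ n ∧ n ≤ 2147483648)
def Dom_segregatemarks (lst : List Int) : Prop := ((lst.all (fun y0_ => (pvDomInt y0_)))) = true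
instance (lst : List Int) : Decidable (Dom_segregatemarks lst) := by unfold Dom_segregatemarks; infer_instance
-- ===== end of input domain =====

-- B replaces A's single accumulating loop with three independent filters (one per bucket); objective: idiomatic.

-- ===== PORT A =====
-- one pass, appending to one of three accumulators
def segregatemarks (lst : List Int) : List Int × List Int × List Int :=
  lst.foldl
    (fun acc val =>
      if val ≥ 80 then (acc.1 ++ [val], acc.2.1, acc.2.2)
      else if val ≥ 50 then (acc.1, acc.2.1 ++ [val], acc.2.2)
      else (acc.1, acc.2.1, acc.2.2 ++ [val]))
    ([], [], [])

-- ===== PORT B =====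
def segregatemarks_alt (lst : List Int) : List Int × List Int × List Int :=
  (lst.filter (fun x => x ≥ 80),
   lst.filter (fun x => 50 ≤ x ∧ x < 80),
   lst.filter (fun x => x < 50))

-- ===== PRECONDITION & SPEC =====
def Spec_segregatemarks (lst : List Int) (out : List Int × List Int × List Int) : Prop := out = segregatemarks_alt lst
instance (lst : List Int) (out : List Int × List Int × List Int) : Decidable (Spec_segregatemarks lst out) := by unfold Spec_segregatemarks; infer_instance

-- ===== CLAIM (what is proved, stated in full; the proofs are below) =====
def Claim_equal_segregatemarks : Prop := ∀ (lst : List Int), Dom_segregatemarks lst → Spec_segregatemarks lst (segregatemarks lst)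

-- ===== LEMMAS AND PROOFS =====

-- generalized loop invariant: fold from any accumulator appends the three filters
theorem segregatemarks_fold_inv (lst : List Int) (a b c : List Int) :
    lst.foldl
      (fun acc val =>
        if val ≥ 80 then (acc.1 ++ [val], acc.2.1, acc.2.2)
        else if val ≥ 50 then (acc.1, acc.2.1 ++ [val], acc.2.2)
        else (acc.1, acc.2.1, acc.2.2 ++ [val]))
      (a, b, c)
    = (a ++ lst.filter (fun x => x ≥ 80),
       b ++ lst.filter (fun x => decide (50 ≤ x ∧ x < 80)),
       c ++ lst.filter (fun x => x < 50)) := by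
  induction lst generalizing a b c with
  | nil => simp
  | cons v t ih =>
    simp only [List.foldl_cons, List.filter_cons]
    by_cases h80 : v ≥ 80
    · simp [h80, ih, show ¬ (50 ≤ v ∧ v < 80) by omega, show ¬ v < 50 by omega]
    · by_cases h50 : v ≥ 50
      · simp [h80, h50, ih, show (50 ≤ v ∧ v < 80) by omega, show ¬ v < 50 by omega,
          show ¬ v ≥ 80 from h80]
      · simp [h80, h50, ih, show ¬ (50 ≤ v ∧ v < 80) by omega, show v < 50 by omega,
          show ¬ v ≥ 80 from h80]

-- ===== VERDICT (by name: the statement is the Claim_ definition above) =====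
theorem segregatemarks_spec : Claim_equal_segregatemarks := by
  intro lst _
  unfold Spec_segregatemarks segregatemarks segregatemarks_alt
  simpa using segregatemarks_fold_inv lst [] [] []
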